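-- pv_equiv track=rewrite | github.com/AuguestGao/data-structures-and-algorithms | Coding Patterns/1 sliding window/problem 1 (hard).py | solution
-- ===== SOURCE A (Python) =====
-- def solution(string, pattern):
--
-- 	start = 0
-- 	matches = 0
-- 	chars_in_pattern = {}
--
-- 	for char in pattern:
-- 		if char not in chars_in_pattern:
-- 			chars_in_pattern[char] = 0
-- 		chars_in_pattern[char] += 1
--
-- 	for end in range(len(string)):
-- 		end_char = string[end]
--
-- 		if end_char in chars_in_pattern:
-- 			chars_in_pattern[end_char] -= 1
-- 			if chars_in_pattern[end_char] == 0: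
-- 				matches += 1
--
-- 		if matches == len(chars_in_pattern):
-- 			return True
--
-- 		if end - start + 1 >= len(pattern):
-- 			start_char = string[start]
-- 			if start_char in chars_in_pattern:
-- 				if chars_in_pattern[start_char] == 0:
-- 					matches -= 1
-- 				chars_in_pattern[start_char] += 1
-- 			start += 1
--
-- 	return False
-- ===== SOURCE B (Python) =====
-- def solution(string, pattern):
--     k = len(pattern)
--     target = sorted(pattern)
--     for i in range(len(string) - k + 1):
--         if sorted(string[i:i + k]) == target:
--             return True
--     return False
-- ===== Notes on version B (the rewrite author's own statement) =====
-- stated objective: simpler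
-- what changed: Replaces the incremental sliding-window algorithm (mutable per-character deficit dict plus a maintained 'matches' counter with window shrinking) by a direct scan that compares sorted(window) with sorted(pattern) for every full-length window.
-- intended difference: On the single input string='' pattern='' A returns False while B returns True; the empty string does contain the (empty) permutation of the empty pattern, and A itself returns True for every non-empty string with the empty pattern, so A's False there is an accident of its loop body never running. — e.g. on solution("", ""): A returns false, B returns true
import Mathlib
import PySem

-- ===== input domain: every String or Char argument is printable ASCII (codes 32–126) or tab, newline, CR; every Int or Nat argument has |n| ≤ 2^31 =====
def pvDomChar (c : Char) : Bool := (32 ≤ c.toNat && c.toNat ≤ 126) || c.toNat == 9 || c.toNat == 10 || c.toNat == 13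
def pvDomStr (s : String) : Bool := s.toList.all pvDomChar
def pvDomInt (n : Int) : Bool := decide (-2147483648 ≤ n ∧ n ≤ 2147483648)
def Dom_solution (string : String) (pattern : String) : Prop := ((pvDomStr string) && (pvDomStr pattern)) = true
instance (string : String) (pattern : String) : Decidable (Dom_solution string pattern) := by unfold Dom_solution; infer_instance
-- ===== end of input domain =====

-- B replaces A's incremental deficit-dict/matches-counter sliding window by a direct
-- scan comparing sorted(window) with sorted(pattern) for every full window (simpler, not faster).


-- ===== PORT A =====
-- first loop of A: builds chars_in_pattern
def buildNeed (p : List Char) : PySem.Dict Char Int :=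
  p.foldl (fun d c =>
    let d' := if d.contains c then d else d.insert c 0
    d'.insert c (d'.getD c 0 + 1)) PySem.Dict.empty

-- main loop of A; the remaining `range(len(string))` indices are the list argument.
-- string[end] and string[start] are ported with pyGetD (exact: both indices are always in range).
def loopA (s : List Char) (plen : Int) : List Int → Int → Int → PySem.Dict Char Int → Bool
  | [], _, _, _ => false
  | e :: rest, start, matchs, d =>
      let endChar := PySem.List.pyGetD s e ' '
      let md : Int × PySem.Dict Char Int :=
        if d.contains endChar then
          let d1 := d.insert endChar (d.getD endChar 0 - 1)
          (if d1.getD endChar 0 = 0 then matchs + 1 else matchs, d1)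
        else (matchs, d)
      let m1 := md.1
      let d1 := md.2
      if m1 = (d1.size : Int) then true
      else
        let smd : Int × Int × PySem.Dict Char Int :=
          if e - start + 1 ≥ plen then
            let startChar := PySem.List.pyGetD s start ' '
            let md2 : Int × PySem.Dict Char Int :=
              if d1.contains startChar then
                ((if d1.getD startChar 0 = 0 then m1 - 1 else m1),
                 d1.insert startChar (d1.getD startChar 0 + 1))
              else (m1, d1)
            (start + 1, md2.1, md2.2)
          else (start, m1, d1)
        loopA s plen rest smd.1 smd.2.1 smd.2.2

def solution (string : String) (pattern : String) : Bool :=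
  loopA string.toList (pattern.toList.length : Int)
    (PySem.List.pyRange 0 (string.toList.length : Int) 1) 0 0 (buildNeed pattern.toList)

-- ===== PORT B =====
def solution_alt (string : String) (pattern : String) : Bool :=
  let s := string.toList
  let p := pattern.toList
  let k : Int := p.length
  let target := PySem.List.sorted p (fun c => c) false
  (PySem.List.pyRange 0 ((s.length : Int) - k + 1) 1).any (fun i =>
    PySem.List.sorted (PySem.List.slice s (some i) (some (i + k))) (fun c => c) false == target)

-- ===== PRECONDITION & SPEC =====
-- On string='' pattern='' A returns False while B returns True; the empty string does contain
-- the empty permutation of the empty pattern (A itself returns True for every non-empty string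
-- with the empty pattern), so A's False there is an accident of its loop body never running.
def D_solution (string : String) (pattern : String) : Prop := string = "" ∧ pattern = ""
instance (string : String) (pattern : String) : Decidable (D_solution string pattern) := by
  unfold D_solution; infer_instance

def Spec_solution (string : String) (pattern : String) (out : Bool) : Prop :=
  ¬ D_solution string pattern → out = solution_alt string pattern
instance (string : String) (pattern : String) (out : Bool) : Decidable (Spec_solution string pattern out) := by
  unfold Spec_solution; infer_instance

def pvDiffWitness_solution : String × String := ("", "")
def pvDiffWitnessOut_solution : Bool × Bool := (false, true)

-- ===== CLAIM (what is proved, stated in full; the proofs are below) =====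
def Claim_unchanged_solution : Prop := ∀ (string : String) (pattern : String),
  Dom_solution string pattern → Spec_solution string pattern (solution string pattern)
def Claim_changed_solution : Prop :=
  Dom_solution (pvDiffWitness_solution.1) (pvDiffWitness_solution.2) ∧
  D_solution (pvDiffWitness_solution.1) (pvDiffWitness_solution.2) ∧
  solution (pvDiffWitness_solution.1) (pvDiffWitness_solution.2) = pvDiffWitnessOut_solution.1 ∧
  solution_alt (pvDiffWitness_solution.1) (pvDiffWitness_solution.2) = pvDiffWitnessOut_solution.2 ∧
  pvDiffWitnessOut_solution.1 ≠ pvDiffWitnessOut_solution.2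
def Claim_exact_solution : Prop := ∀ (string : String) (pattern : String),
  Dom_solution string pattern → D_solution string pattern →
  solution string pattern ≠ solution_alt string pattern

-- ===== LEMMAS AND PROOFS =====

theorem countP_or_eq (w : List Char) (c : Char) (K : List Char) (hc : c ∉ K) :
    w.countP (fun x => decide (x = c ∨ x ∈ K)) = w.count c + w.countP (fun x => decide (x ∈ K)) := by
  induction w with
  | nil => simp
  | cons a w ih =>
    simp only [List.countP_cons, List.count_cons, ih]
    by_cases h1 : a = c
    · subst h1; simp [hc]; omega
    · by_cases h2 : a ∈ K
      · simp [h1, h2]; omega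
      · simp [h1, h2]

theorem sum_count_nodup (K : List Char) (hK : K.Nodup) (w : List Char) :
    (K.map (fun c => w.count c)).sum = w.countP (fun x => decide (x ∈ K)) := by
  induction K with
  | nil => simp
  | cons c K ih =>
    rw [List.nodup_cons] at hK
    simp only [List.map_cons, List.sum_cons, ih hK.2]
    rw [show (fun x => decide (x ∈ c :: K)) = (fun x => decide (x = c ∨ x ∈ K)) by
          funext x; simp [List.mem_cons],
        countP_or_eq w c K hK.1]

theorem eq_of_sum_eq (K : List Char) (f g : Char → ℕ) (hle : ∀ c ∈ K, f c ≤ g c)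
    (hsum : (K.map g).sum ≤ (K.map f).sum) : ∀ c ∈ K, f c = g c := by
  induction K with
  | nil => simp
  | cons c K ih =>
    simp only [List.map_cons, List.sum_cons] at hsum
    have h1 : (K.map f).sum ≤ (K.map g).sum :=
      List.sum_le_sum (fun x hx => hle x (List.mem_cons_of_mem _ hx))
    have hc : f c ≤ g c := hle c (List.mem_cons_self ..)
    intro x hx
    rcases List.mem_cons.mp hx with h | h
    · subst h; omega
    · exact ih (fun y hy => hle y (List.mem_cons_of_mem _ hy)) (by omega) x h

theorem forall_le_iff_perm (p w : List Char) (hw : w.length ≤ p.length) :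
    (∀ c ∈ PySem.Set.ofList p, p.count c ≤ w.count c) ↔ w.Perm p := by
  have hK : (PySem.Set.ofList p).Nodup := PySem.Set.nodup_ofList p
  have hmem : ∀ c, c ∈ PySem.Set.ofList p ↔ c ∈ p := fun c => PySem.Set.mem_ofList p c
  constructor
  · intro h
    have hsp : ((PySem.Set.ofList p).map (fun c => p.count c)).sum = p.length := by
      rw [sum_count_nodup _ hK p, List.countP_eq_length.mpr]
      intro a ha; simpa using (hmem a).mpr ha
    have hsw : ((PySem.Set.ofList p).map (fun c => w.count c)).sum
        = w.countP (fun x => decide (x ∈ PySem.Set.ofList p)) := sum_count_nodup _ hK w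
    have hle : ((PySem.Set.ofList p).map (fun c => p.count c)).sum
        ≤ ((PySem.Set.ofList p).map (fun c => w.count c)).sum :=
      List.sum_le_sum (fun c hc => h c hc)
    have hcl : w.countP (fun x => decide (x ∈ PySem.Set.ofList p)) ≤ w.length :=
      List.countP_le_length
    have hall : ∀ x ∈ w, x ∈ PySem.Set.ofList p := by
      have hfull : w.countP (fun x => decide (x ∈ PySem.Set.ofList p)) = w.length := by omega
      intro x hx
      simpa using (List.countP_eq_length.mp hfull) x hx
    have heq : ∀ c ∈ PySem.Set.ofList p, p.count c = w.count c :=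
      eq_of_sum_eq _ _ _ h (by omega)
    rw [List.perm_iff_count]
    intro a
    by_cases haK : a ∈ PySem.Set.ofList p
    · exact (heq a haK).symm
    · rw [List.count_eq_zero.mpr (fun hm => haK (hall a hm)),
          List.count_eq_zero.mpr (fun hm => haK ((hmem a).mpr hm))]
  · intro hperm c _
    exact le_of_eq (hperm.count_eq c).symm

theorem countP_pointwise (K : List Char) (hK : K.Nodup) (c₀ : Char) (hc₀ : c₀ ∈ K)
    (f g : Char → Bool) (hoff : ∀ c ∈ K, c ≠ c₀ → f c = g c) :
    (K.countP g : ℤ) = K.countP f + ((if g c₀ then 1 else 0) - (if f c₀ then 1 else 0)) := by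
  induction K with
  | nil => simp at hc₀
  | cons a K ih =>
    rw [List.nodup_cons] at hK
    rcases List.mem_cons.mp hc₀ with h | h
    · subst h
      have hsame : K.countP f = K.countP g := by
        apply List.countP_congr
        intro c hc
        rw [hoff c (List.mem_cons_of_mem _ hc) (fun he => hK.1 (he ▸ hc))]
      simp only [List.countP_cons, hsame]
      by_cases hf : f c₀ <;> by_cases hg : g c₀ <;> simp [hf, hg]
    · have ha : a ≠ c₀ := fun he => hK.1 (he ▸ h)
      have := ih hK.2 h (fun c hc hne => hoff c (List.mem_cons_of_mem _ hc) hne)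
      simp only [List.countP_cons, hoff a (List.mem_cons_self ..) ha]
      by_cases hg : g a <;> simp [hg] <;> omega

def sN (k e : ℕ) : ℕ := e + 1 - k
def wPre (l : List Char) (k e : ℕ) : List Char := (l.drop (sN k e)).take (e - sN k e)
def wAdd (l : List Char) (k e : ℕ) : List Char := (l.drop (sN k e)).take (e - sN k e + 1)
def pred (p w : List Char) (c : Char) : Bool := decide (p.count c ≤ w.count c)

theorem sN_le {k e : ℕ} (hk : 1 ≤ k) : sN k e ≤ e := by unfold sN; omega

theorem wAdd_eq_append (l : List Char) (k e : ℕ) (hk : 1 ≤ k) (he : e < l.length) :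
    wAdd l k e = wPre l k e ++ [l.getD e ' '] := by
  have ha : sN k e ≤ e := sN_le hk
  rw [wAdd, wPre, List.take_add_one]
  congr 1
  rw [List.getElem?_drop]
  rw [show sN k e + (e - sN k e) = e by omega, List.getElem?_eq_getElem he]
  simp [List.getD, List.getElem?_eq_getElem he]

theorem wAdd_eq_cons (l : List Char) (k e : ℕ) (hk : 1 ≤ k) (he : e < l.length)
    (hfull : k ≤ e + 1) :
    wAdd l k e = l.getD (sN k e) ' ' :: wPre l k (e + 1) := by
  have ha : sN k e < l.length := lt_of_le_of_lt (sN_le hk) he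
  rw [wAdd, wPre, List.drop_eq_getElem_cons ha, List.take_succ_cons]
  congr 1
  · simp [List.getD, List.getElem?_eq_getElem ha]
  · rw [show sN k (e + 1) = sN k e + 1 by unfold sN; omega]
    congr 1
    unfold sN; omega

theorem wPre_succ_small (l : List Char) (k e : ℕ) (hsmall : e + 1 < k) :
    wPre l k (e + 1) = wAdd l k e := by
  rw [wPre, wAdd, show sN k (e+1) = 0 by unfold sN; omega, show sN k e = 0 by unfold sN; omega]
  congr 1

theorem wAdd_length (l : List Char) (k e : ℕ) (hk : 1 ≤ k) (he : e < l.length) :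
    (wAdd l k e).length = e - sN k e + 1 := by
  simp only [wAdd, List.length_take, List.length_drop]
  unfold sN
  omega

theorem wAdd_full (l : List Char) (k e : ℕ) (hk : 1 ≤ k) (hfull : k ≤ e + 1) :
    wAdd l k e = (l.drop (e + 1 - k)).take k := by
  simp only [wAdd, sN]
  rw [show e - (e + 1 - k) + 1 = k by omega]

theorem count_snoc (w : List Char) (a c : Char) :
    (w ++ [a]).count c = w.count c + (if a = c then 1 else 0) := by
  simp [List.count_append, List.count_cons]

theorem count_cons' (w : List Char) (a c : Char) :
    (a :: w).count c = w.count c + (if a = c then 1 else 0) := by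
  simp [List.count_cons]

theorem dict_size_eq_keys_length (d : PySem.Dict Char Int) : d.size = d.keys.length := by
  simp [PySem.Dict.size, PySem.Dict.keys]

theorem add_phase (l p : List Char) (hk : 1 ≤ p.length) (e : ℕ) (he : e < l.length)
    (matchs : ℤ) (d : PySem.Dict Char Int)
    (hkeys : d.keys = PySem.Set.ofList p)
    (hval : ∀ c ∈ p, d.getD c 0 = (p.count c : ℤ) - ((wPre l p.length e).count c : ℤ))
    (hm : matchs = (((PySem.Set.ofList p).countP (pred p (wPre l p.length e)) : ℕ) : ℤ)) :
    (((if d.contains (l.getD e ' ') then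
        ((if (d.insert (l.getD e ' ') (d.getD (l.getD e ' ') 0 - 1)).getD (l.getD e ' ') 0 = 0
            then matchs + 1 else matchs),
         d.insert (l.getD e ' ') (d.getD (l.getD e ' ') 0 - 1))
      else (matchs, d)) : ℤ × PySem.Dict Char Int).2.keys = PySem.Set.ofList p) ∧
    (∀ c ∈ p, ((if d.contains (l.getD e ' ') then
        ((if (d.insert (l.getD e ' ') (d.getD (l.getD e ' ') 0 - 1)).getD (l.getD e ' ') 0 = 0
            then matchs + 1 else matchs),
         d.insert (l.getD e ' ') (d.getD (l.getD e ' ') 0 - 1))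
      else (matchs, d)).2.getD c 0 = (p.count c : ℤ) - ((wAdd l p.length e).count c : ℤ))) ∧
    ((if d.contains (l.getD e ' ') then
        ((if (d.insert (l.getD e ' ') (d.getD (l.getD e ' ') 0 - 1)).getD (l.getD e ' ') 0 = 0
            then matchs + 1 else matchs),
         d.insert (l.getD e ' ') (d.getD (l.getD e ' ') 0 - 1))
      else (matchs, d)).1 = (((PySem.Set.ofList p).countP (pred p (wAdd l p.length e)) : ℕ) : ℤ)) := by
  set c₀ := l.getD e ' ' with hc₀def
  have hw : wAdd l p.length e = wPre l p.length e ++ [c₀] := wAdd_eq_append l p.length e hk he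
  have hcnt : ∀ c, (wAdd l p.length e).count c
      = (wPre l p.length e).count c + (if c₀ = c then 1 else 0) := by
    intro c; rw [hw, count_snoc]
  by_cases hmemp : c₀ ∈ p
  · have hcont : d.contains c₀ = true := by
      rw [PySem.Dict.contains_iff_mem_keys, hkeys, PySem.Set.mem_ofList]; exact hmemp
    simp only [hcont, if_true]
    refine ⟨PySem.Dict.keys_insert_of_contains d _ hcont ▸ hkeys, ?_, ?_⟩
    · intro c hc
      rw [PySem.Dict.getD_insert]
      by_cases hcc : c = c₀
      · rw [if_pos hcc, hcc, hval c₀ hmemp, hcnt c₀, if_pos rfl]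
        push_cast; ring
      · rw [if_neg hcc, hval c hc, hcnt c, if_neg (fun h => hcc h.symm)]
        push_cast; ring
    · have hup := countP_pointwise (PySem.Set.ofList p) (PySem.Set.nodup_ofList p) c₀
        ((PySem.Set.mem_ofList p c₀).mpr hmemp)
        (pred p (wPre l p.length e)) (pred p (wAdd l p.length e))
        (by intro c _ hne
            unfold pred
            rw [hcnt c, if_neg (fun h => hne h.symm), Nat.add_zero])
      have hA : pred p (wAdd l p.length e) c₀
          = decide (p.count c₀ ≤ (wPre l p.length e).count c₀ + 1) := by
        unfold pred; rw [hcnt c₀, if_pos rfl]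
      rw [hA] at hup
      rw [hm, PySem.Dict.getD_insert_self, hval c₀ hmemp]
      by_cases hz : (p.count c₀ : ℤ) - ((wPre l p.length e).count c₀ : ℤ) - 1 = 0
      · have h1 : decide (p.count c₀ ≤ (wPre l p.length e).count c₀ + 1) = true :=
          decide_eq_true (by omega)
        have h2 : pred p (wPre l p.length e) c₀ = false := by
          unfold pred; exact decide_eq_false (by omega)
        rw [h1, h2] at hup
        simp only [if_true, if_false, Bool.false_eq_true] at hup
        rw [if_pos hz]
        omega
      · rw [if_neg hz]
        by_cases hge : p.count c₀ ≤ (wPre l p.length e).count c₀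
        · have h1 : decide (p.count c₀ ≤ (wPre l p.length e).count c₀ + 1) = true :=
            decide_eq_true (by omega)
          have h2 : pred p (wPre l p.length e) c₀ = true := by
            unfold pred; exact decide_eq_true hge
          rw [h1, h2] at hup
          simp only [if_true] at hup
          omega
        · have h1 : decide (p.count c₀ ≤ (wPre l p.length e).count c₀ + 1) = false :=
            decide_eq_false (by omega)
          have h2 : pred p (wPre l p.length e) c₀ = false := by
            unfold pred; exact decide_eq_false hge
          rw [h1, h2] at hup
          simp only [if_false, Bool.false_eq_true] at hup
          omega
  · have hcont : d.contains c₀ = false := by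
      rw [← Bool.not_eq_true, PySem.Dict.contains_iff_mem_keys, hkeys, PySem.Set.mem_ofList]
      exact hmemp
    simp only [hcont, Bool.false_eq_true, if_false]
    refine ⟨hkeys, ?_, ?_⟩
    · intro c hc
      rw [hval c hc, hcnt c, if_neg (fun (h : c₀ = c) => hmemp (h ▸ hc)), Nat.add_zero]
    · rw [hm]
      congr 1
      apply List.countP_congr
      intro c hcK
      have hcp : c ∈ p := (PySem.Set.mem_ofList p c).mp hcK
      have hpe : pred p (wPre l p.length e) c = pred p (wAdd l p.length e) c := by
        unfold pred
        rw [hcnt c, if_neg (fun (h : c₀ = c) => hmemp (h ▸ hcp)), Nat.add_zero]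
      rw [hpe]

def goodAt (l p : List Char) (e : ℕ) : Prop :=
  p.length ≤ e + 1 ∧ ((l.drop (e + 1 - p.length)).take p.length).Perm p


theorem ret_iff (l p : List Char) (hk : 1 ≤ p.length) (e : ℕ) (he : e < l.length)
    (d₁ : PySem.Dict Char Int) (hkeys : d₁.keys = PySem.Set.ofList p) :
    (((((PySem.Set.ofList p).countP (pred p (wAdd l p.length e)) : ℕ)) : ℤ) = (d₁.size : ℤ))
      ↔ goodAt l p e := by
  rw [dict_size_eq_keys_length, hkeys, Nat.cast_inj]
  have hlen : (wAdd l p.length e).length = e - sN p.length e + 1 :=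
    wAdd_length l p.length e hk he
  have hforall : List.countP (pred p (wAdd l p.length e)) (PySem.Set.ofList p)
      = (PySem.Set.ofList p).length ↔ ∀ c ∈ p, p.count c ≤ (wAdd l p.length e).count c := by
    rw [List.countP_eq_length]
    constructor
    · intro h c hc
      have := h c ((PySem.Set.mem_ofList p c).mpr hc)
      unfold pred at this
      exact of_decide_eq_true this
    · intro h c hc
      unfold pred
      exact decide_eq_true (h c ((PySem.Set.mem_ofList p c).mp hc))
  by_cases hfull : p.length ≤ e + 1
  · have hwl : (wAdd l p.length e).length ≤ p.length := by unfold sN at hlen; omega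
    rw [hforall]
    have hiff : (∀ c ∈ PySem.Set.ofList p, p.count c ≤ (wAdd l p.length e).count c)
        ↔ (wAdd l p.length e).Perm p := forall_le_iff_perm p _ hwl
    constructor
    · intro h
      refine ⟨hfull, ?_⟩
      have hperm := hiff.mp (fun c hc => h c ((PySem.Set.mem_ofList p c).mp hc))
      rwa [wAdd_full l p.length e hk hfull] at hperm
    · intro h c hc
      have hperm : (wAdd l p.length e).Perm p := by
        rw [wAdd_full l p.length e hk hfull]; exact h.2
      exact hiff.mpr hperm c ((PySem.Set.mem_ofList p c).mpr hc)
  · constructor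
    · intro h
      exfalso
      have hwl : (wAdd l p.length e).length ≤ p.length := by unfold sN at hlen; omega
      have hperm := (forall_le_iff_perm p _ hwl).mp
        (fun c hc => (hforall.mp h) c ((PySem.Set.mem_ofList p c).mp hc))
      have := hperm.length_eq
      unfold sN at hlen
      omega
    · intro h
      exact absurd h.1 hfull

theorem shrink_full (l p : List Char) (hk : 1 ≤ p.length) (e : ℕ) (he : e < l.length)
    (hfull : p.length ≤ e + 1) (m₁ : ℤ) (d₁ : PySem.Dict Char Int)
    (hkeys : d₁.keys = PySem.Set.ofList p)
    (hval : ∀ c ∈ p, d₁.getD c 0 = (p.count c : ℤ) - ((wAdd l p.length e).count c : ℤ))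
    (hm : m₁ = (((PySem.Set.ofList p).countP (pred p (wAdd l p.length e)) : ℕ) : ℤ)) :
    (((if d₁.contains (l.getD (sN p.length e) ' ') then
        ((if d₁.getD (l.getD (sN p.length e) ' ') 0 = 0 then m₁ - 1 else m₁),
         d₁.insert (l.getD (sN p.length e) ' ') (d₁.getD (l.getD (sN p.length e) ' ') 0 + 1))
      else (m₁, d₁)) : ℤ × PySem.Dict Char Int).2.keys = PySem.Set.ofList p) ∧
    (∀ c ∈ p, ((if d₁.contains (l.getD (sN p.length e) ' ') then
        ((if d₁.getD (l.getD (sN p.length e) ' ') 0 = 0 then m₁ - 1 else m₁),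
         d₁.insert (l.getD (sN p.length e) ' ') (d₁.getD (l.getD (sN p.length e) ' ') 0 + 1))
      else (m₁, d₁)).2.getD c 0 = (p.count c : ℤ) - ((wPre l p.length (e + 1)).count c : ℤ))) ∧
    ((if d₁.contains (l.getD (sN p.length e) ' ') then
        ((if d₁.getD (l.getD (sN p.length e) ' ') 0 = 0 then m₁ - 1 else m₁),
         d₁.insert (l.getD (sN p.length e) ' ') (d₁.getD (l.getD (sN p.length e) ' ') 0 + 1))
      else (m₁, d₁)).1 = (((PySem.Set.ofList p).countP (pred p (wPre l p.length (e + 1))) : ℕ) : ℤ)) := by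
  set sc := l.getD (sN p.length e) ' ' with hscdef
  have hw : wAdd l p.length e = sc :: wPre l p.length (e + 1) :=
    wAdd_eq_cons l p.length e hk he hfull
  have hcnt : ∀ c, (wAdd l p.length e).count c
      = (wPre l p.length (e + 1)).count c + (if sc = c then 1 else 0) := by
    intro c; rw [hw, count_cons']
  by_cases hmemp : sc ∈ p
  · have hcont : d₁.contains sc = true := by
      rw [PySem.Dict.contains_iff_mem_keys, hkeys, PySem.Set.mem_ofList]; exact hmemp
    simp only [hcont, if_true]
    refine ⟨PySem.Dict.keys_insert_of_contains d₁ _ hcont ▸ hkeys, ?_, ?_⟩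
    · intro c hc
      rw [PySem.Dict.getD_insert]
      by_cases hcc : c = sc
      · rw [if_pos hcc, hcc, hval sc hmemp, hcnt sc, if_pos rfl]
        push_cast; ring
      · rw [if_neg hcc, hval c hc, hcnt c, if_neg (fun h => hcc h.symm), Nat.add_zero]
    · have hup := countP_pointwise (PySem.Set.ofList p) (PySem.Set.nodup_ofList p) sc
        ((PySem.Set.mem_ofList p sc).mpr hmemp)
        (pred p (wAdd l p.length e)) (pred p (wPre l p.length (e + 1)))
        (by intro c _ hne
            unfold pred
            rw [hcnt c, if_neg (fun h => hne h.symm), Nat.add_zero])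
      have hA : pred p (wAdd l p.length e) sc
          = decide (p.count sc ≤ (wPre l p.length (e + 1)).count sc + 1) := by
        unfold pred; rw [hcnt sc, if_pos rfl]
      rw [hA] at hup
      rw [hm, hval sc hmemp]
      by_cases hz : (p.count sc : ℤ) - ((wAdd l p.length e).count sc : ℤ) = 0
      · have hz' : p.count sc = (wPre l p.length (e + 1)).count sc + 1 := by
          rw [hcnt sc, if_pos rfl] at hz; push_cast at hz; omega
        have h1 : decide (p.count sc ≤ (wPre l p.length (e + 1)).count sc + 1) = true :=
          decide_eq_true (by omega)
        have h2 : pred p (wPre l p.length (e + 1)) sc = false := by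
          unfold pred; exact decide_eq_false (by omega)
        rw [h1, h2] at hup
        simp only [if_true, if_false, Bool.false_eq_true] at hup
        rw [if_pos hz]
        omega
      · have hz' : p.count sc ≠ (wPre l p.length (e + 1)).count sc + 1 := by
          rw [hcnt sc, if_pos rfl] at hz; push_cast at hz; omega
        rw [if_neg hz]
        by_cases hge : p.count sc ≤ (wPre l p.length (e + 1)).count sc
        · have h1 : decide (p.count sc ≤ (wPre l p.length (e + 1)).count sc + 1) = true :=
            decide_eq_true (by omega)
          have h2 : pred p (wPre l p.length (e + 1)) sc = true := by
            unfold pred; exact decide_eq_true hge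
          rw [h1, h2] at hup
          simp only [if_true] at hup
          omega
        · have h1 : decide (p.count sc ≤ (wPre l p.length (e + 1)).count sc + 1) = false :=
            decide_eq_false (by omega)
          have h2 : pred p (wPre l p.length (e + 1)) sc = false := by
            unfold pred; exact decide_eq_false hge
          rw [h1, h2] at hup
          simp only [if_false, Bool.false_eq_true] at hup
          omega
  · have hcont : d₁.contains sc = false := by
      rw [← Bool.not_eq_true, PySem.Dict.contains_iff_mem_keys, hkeys, PySem.Set.mem_ofList]
      exact hmemp
    simp only [hcont, Bool.false_eq_true, if_false]
    refine ⟨hkeys, ?_, ?_⟩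
    · intro c hc
      rw [hval c hc, hcnt c, if_neg (fun (h : sc = c) => hmemp (h ▸ hc)), Nat.add_zero]
    · rw [hm]
      congr 1
      apply List.countP_congr
      intro c hcK
      have hcp : c ∈ p := (PySem.Set.mem_ofList p c).mp hcK
      have hpe : pred p (wAdd l p.length e) c = pred p (wPre l p.length (e + 1)) c := by
        unfold pred
        rw [hcnt c, if_neg (fun (h : sc = c) => hmemp (h ▸ hcp)), Nat.add_zero]
      rw [hpe]

-- A's acceptance predicate: the full window of length |p| ending at index e is a permutation of p.

theorem buildNeed_step (d : PySem.Dict Char Int) (c : Char) :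
    (let d' := if d.contains c then d else d.insert c 0
     d'.insert c (d'.getD c 0 + 1)) = d.modify c 0 (· + 1) := by
  by_cases h : d.contains c
  · simp [h, PySem.Dict.modify]
  · simp only [h, Bool.false_eq_true, if_false]
    rw [PySem.Dict.insert_insert_self, PySem.Dict.getD_insert_self, PySem.Dict.modify,
        PySem.Dict.getD_of_not_contains _ _ (by simpa using h)]


theorem buildNeed_eq_counter (p : List Char) : buildNeed p = PySem.Dict.counter p := by
  rw [PySem.Dict.counter_eq_foldl, buildNeed]
  congr 1
  funext d c
  exact buildNeed_step d c

theorem loopA_iff (l p : List Char) (hk : 1 ≤ p.length) :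
    ∀ (j e : ℕ), e + j = l.length →
      ∀ (start matchs : ℤ) (d : PySem.Dict Char Int),
        start = ((sN p.length e : ℕ) : ℤ) →
        d.keys = PySem.Set.ofList p →
        (∀ c ∈ p, d.getD c 0 = (p.count c : ℤ) - ((wPre l p.length e).count c : ℤ)) →
        matchs = (((PySem.Set.ofList p).countP (pred p (wPre l p.length e)) : ℕ) : ℤ) →
        (loopA l (p.length : ℤ) (PySem.List.pyRange (e : ℤ) (l.length : ℤ) 1) start matchs d = true
          ↔ ∃ e', e ≤ e' ∧ e' < l.length ∧ goodAt l p e') := by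
  intro j
  induction j with
  | zero =>
    intro e hej start matchs d _ _ _ _
    rw [PySem.List.pyRange_one_eq_nil (by omega)]
    rw [show loopA l (p.length : ℤ) [] start matchs d = false from rfl]
    constructor
    · intro h; exact absurd h (by simp)
    · rintro ⟨e', h1, h2, _⟩; omega
  | succ j ih =>
    intro e hej start matchs d hstart hkeys hval hm
    have he : e < l.length := by omega
    subst hstart
    rw [PySem.List.pyRange_one_cons (by omega)]
    simp only [loopA, PySem.List.pyGetD_natCast]
    obtain ⟨hk1, hv1, hm1⟩ := add_phase l p hk e he matchs d hkeys hval hm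
    set md := (if d.contains (l.getD e ' ') then
        ((if (d.insert (l.getD e ' ') (d.getD (l.getD e ' ') 0 - 1)).getD (l.getD e ' ') 0 = 0
            then matchs + 1 else matchs),
         d.insert (l.getD e ' ') (d.getD (l.getD e ' ') 0 - 1))
      else (matchs, d)) with hmddef
    rw [hm1]
    by_cases hret : (((PySem.Set.ofList p).countP (pred p (wAdd l p.length e)) : ℕ) : ℤ)
        = (md.2.size : ℤ)
    · rw [if_pos hret]
      simp only [true_iff]
      exact ⟨e, le_refl e, he, (ret_iff l p hk e he md.2 hk1).mp hret⟩
    · rw [if_neg hret]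
      have hnotgood : ¬ goodAt l p e := fun hg => hret ((ret_iff l p hk e he md.2 hk1).mpr hg)
      have hsplit : (∃ e', e ≤ e' ∧ e' < l.length ∧ goodAt l p e')
          ↔ (∃ e', e + 1 ≤ e' ∧ e' < l.length ∧ goodAt l p e') := by
        constructor
        · rintro ⟨e', h1, h2, h3⟩
          rcases Nat.eq_or_lt_of_le h1 with h | h
          · exact absurd (h ▸ h3) hnotgood
          · exact ⟨e', h, h2, h3⟩
        · rintro ⟨e', h1, h2, h3⟩
          exact ⟨e', by omega, h2, h3⟩
      rw [hsplit]
      have hcast : ((e : ℤ) + 1) = (((e + 1 : ℕ)) : ℤ) := by push_cast; ring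
      by_cases hfull : p.length ≤ e + 1
      · rw [if_pos (by unfold sN; omega)]
        obtain ⟨hk2, hv2, hm2⟩ := shrink_full l p hk e he hfull
          ((((PySem.Set.ofList p).countP (pred p (wAdd l p.length e)) : ℕ) : ℤ)) md.2 hk1 hv1 rfl
        rw [hcast]
        exact ih (e + 1) (by omega) _ _ _
          (by unfold sN; push_cast; omega) hk2 hv2 hm2
      · rw [if_neg (by unfold sN; omega)]
        rw [hcast]
        apply ih (e + 1) (by omega) _ _ _ (by unfold sN; push_cast; omega) hk1
        case _ => rw [wPre_succ_small l p.length e (by omega)]; exact hv1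
        case _ => rw [wPre_succ_small l p.length e (by omega)]

theorem wPre_zero (l : List Char) (k : ℕ) : wPre l k 0 = [] := by
  simp [wPre]

theorem solution_alt_iff (s p : String) :
    solution_alt s p = true ↔
      ∃ i : ℕ, i + p.toList.length ≤ s.toList.length ∧
        ((s.toList.drop i).take p.toList.length).Perm p.toList := by
  simp only [solution_alt, List.any_eq_true, beq_iff_eq]
  constructor
  · rintro ⟨x, hx, hpred⟩
    rw [PySem.List.mem_pyRange_one] at hx
    obtain ⟨hx0, hx1⟩ := hx
    lift x to ℕ using hx0 with i
    refine ⟨i, by omega, ?_⟩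
    rw [PySem.List.slice_natCast_add] at hpred
    exact (PySem.List.sorted_id_eq_sorted_id_iff_perm _ _).mp hpred
  · rintro ⟨i, hlen, hperm⟩
    refine ⟨(i : ℤ), ?_, ?_⟩
    · rw [PySem.List.mem_pyRange_one]; omega
    · rw [PySem.List.slice_natCast_add]
      exact (PySem.List.sorted_id_eq_sorted_id_iff_perm _ _).mpr hperm

theorem solution_iff (s p : String) (hp : p.toList ≠ []) :
    solution s p = true ↔ ∃ e : ℕ, e < s.toList.length ∧ goodAt s.toList p.toList e := by
  have hk : 1 ≤ p.toList.length := List.length_pos_iff.mpr hp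
  unfold solution
  rw [buildNeed_eq_counter]
  have hmain := loopA_iff s.toList p.toList hk s.toList.length 0 (by omega) 0 0
    (PySem.Dict.counter p.toList)
    (by unfold sN; push_cast; omega)
    (PySem.Dict.keys_counter p.toList)
    (by intro c hc
        rw [PySem.Dict.getD_counter, wPre_zero]
        simp)
    (by rw [wPre_zero]
        have : (PySem.Set.ofList p.toList).countP (pred p.toList ([] : List Char)) = 0 := by
          rw [List.countP_eq_zero]
          intro c hc
          have hcp : c ∈ p.toList := (PySem.Set.mem_ofList p.toList c).mp hc
          unfold pred
          simp only [List.count_nil, decide_eq_true_eq]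
          exact Nat.not_le.mpr (List.count_pos_iff.mpr hcp)
        rw [this]
        rfl)
  rw [show ((0:ℕ):ℤ) = (0:ℤ) from rfl] at hmain
  rw [hmain]
  constructor
  · rintro ⟨e, _, h2, h3⟩; exact ⟨e, h2, h3⟩
  · rintro ⟨e, h2, h3⟩; exact ⟨e, Nat.zero_le e, h2, h3⟩

theorem solution_empty_pat (s p : String) (hs : s.toList ≠ []) (hp : p.toList = []) :
    solution s p = true := by
  unfold solution
  rw [hp]
  have hn : 0 < s.toList.length := List.length_pos_iff.mpr hs
  rw [show ((([] : List Char).length : ℤ)) = (0 : ℤ) from rfl]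
  rw [PySem.List.pyRange_one_cons (by omega)]
  simp [loopA, buildNeed, PySem.Dict.contains_empty, PySem.Dict.size]

-- ===== VERDICT (by name: the statement is the Claim_ definition above) =====
theorem solution_spec : Claim_unchanged_solution := by
  intro s p _ hD
  by_cases hp : p.toList = []
  · by_cases hs : s.toList = []
    · exact absurd ⟨String.toList_eq_nil_iff.mp hs, String.toList_eq_nil_iff.mp hp⟩ hD
    · have hb : solution_alt s p = true := (solution_alt_iff s p).mpr ⟨0, by simp [hp]⟩
      rw [solution_empty_pat s p hs hp, hb]
  · have hk : 1 ≤ p.toList.length := List.length_pos_iff.mpr hp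
    rw [Bool.eq_iff_iff, solution_iff s p hp, solution_alt_iff s p]
    constructor
    · rintro ⟨e, hen, ⟨hke, hperm⟩⟩
      exact ⟨e + 1 - p.toList.length, by omega, hperm⟩
    · rintro ⟨i, hin, hperm⟩
      refine ⟨i + p.toList.length - 1, by omega, by omega, ?_⟩
      have hidx : i + p.toList.length - 1 + 1 - p.toList.length = i := by omega
      rw [hidx]; exact hperm

theorem solution_changed : Claim_changed_solution := by
  unfold Claim_changed_solution; decide

theorem solution_tight : Claim_exact_solution := by
  intro s p _ hD
  obtain ⟨h1, h2⟩ := hD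
  subst h1; subst h2; decide
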